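-- pv_equiv track=rewrite | github.com/jgsmith725/AdventOfCode | 2021/11/problem11.py | chainFlash
-- ===== SOURCE A (Python) =====
-- def chainFlash(grid, flashLocs, flashCount):
--     flashCount += len(flashLocs)
--     while len(flashLocs) > 0:
--         newLocs = []
--         for loc in flashLocs:
--             newLocs = newLocs + flashNeighbors(grid, loc[0], loc[1])
--         flashCount += len(newLocs)
--         flashLocs = newLocs
--     return flashCount
--
-- def flashNeighbors(grid, row, octopus):
--     flashLocs = []
--     flashLocs = flashAtLoc(grid, row, octopus + 1, flashLocs)
--     flashLocs = flashAtLoc(grid, row, octopus - 1, flashLocs)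
--     flashLocs = flashAtLoc(grid, row + 1, octopus, flashLocs)
--     flashLocs = flashAtLoc(grid, row - 1, octopus, flashLocs)
--     flashLocs = flashAtLoc(grid, row + 1, octopus + 1, flashLocs)
--     flashLocs = flashAtLoc(grid, row + 1, octopus - 1, flashLocs)
--     flashLocs = flashAtLoc(grid, row - 1, octopus + 1, flashLocs)
--     flashLocs = flashAtLoc(grid, row - 1, octopus - 1, flashLocs)
--     return flashLocs
--
-- def flashAtLoc(grid, row, octopus, flashLocs):
--     if isValid(grid, row, octopus):
--         grid[row][octopus] += 1
--         if grid[row][octopus] == 10: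
--             flashLocs.append((row, octopus))
--     return flashLocs
--
-- def isValid(grid, row, octopus):
--     return row >= 0 and row < len(grid) and octopus >= 0 and octopus < len(grid[row])
-- ===== SOURCE B (Python) =====
-- def chainFlash(grid, flashLocs, flashCount):
--     # Single FIFO worklist instead of wave-by-wave frontier rebuilding.
--     # Mutates grid in place exactly like the original.
--     queue = list(flashLocs)
--     flashCount += len(queue)
--     while queue:
--         r, c = queue.pop(0)
--         for dr, dc in ((0, 1), (0, -1), (1, 0), (-1, 0),
--                        (1, 1), (1, -1), (-1, 1), (-1, -1)):
--             rr, cc = r + dr, c + dc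
--             if 0 <= rr < len(grid) and 0 <= cc < len(grid[rr]):
--                 grid[rr][cc] += 1
--                 if grid[rr][cc] == 10:
--                     queue.append((rr, cc))
--                     flashCount += 1
--     return flashCount
-- ===== Notes on version B (the rewrite author's own statement) =====
-- stated objective: alternative
-- what changed: Replaces A's nested wave-by-wave BFS (rebuild a frontier list per generation via repeated list concatenation, plus a chain of per-neighbor helper functions) with a single flat FIFO worklist loop that pops one cell at a time, iterates its 8 neighbor offsets inline, and counts each push as it happens.
import Mathlib
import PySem

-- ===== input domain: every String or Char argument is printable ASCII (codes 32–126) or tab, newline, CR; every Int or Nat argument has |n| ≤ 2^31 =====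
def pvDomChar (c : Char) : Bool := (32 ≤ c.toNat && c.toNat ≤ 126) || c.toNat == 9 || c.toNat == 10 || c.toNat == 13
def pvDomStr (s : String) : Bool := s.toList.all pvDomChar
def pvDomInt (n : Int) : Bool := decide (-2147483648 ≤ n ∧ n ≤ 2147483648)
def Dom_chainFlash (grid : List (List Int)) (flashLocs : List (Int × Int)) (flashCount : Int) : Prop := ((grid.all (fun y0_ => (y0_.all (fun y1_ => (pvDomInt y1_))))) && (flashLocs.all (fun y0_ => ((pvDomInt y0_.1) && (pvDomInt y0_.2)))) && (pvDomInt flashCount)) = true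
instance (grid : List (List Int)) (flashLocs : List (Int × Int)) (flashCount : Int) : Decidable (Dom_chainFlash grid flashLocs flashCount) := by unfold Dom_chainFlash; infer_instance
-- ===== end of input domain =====

-- B replaces A's wave-by-wave frontier rebuilding with a single FIFO worklist (same grid
-- mutations in the same order; the proved equivalence is about the RETURN value only —
-- both Pythons mutate `grid` in place identically).

-- Termination measure: number of grid cells with value < 10 (a cell reaches exactly 10 at
-- most once, so each worklist push is paid for by one such cell disappearing).
def pvRowCnt (row : List Int) : Nat := (row.filter (fun x => decide (x < 10))).length

def pvLcnt (g : List (List Int)) : Nat := (g.map pvRowCnt).sum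

-- ===== PORT A =====
def isValid (grid : List (List Int)) (row octopus : Int) : Bool :=
  decide (0 ≤ row) && decide (row < (grid.length : Int)) && decide (0 ≤ octopus) &&
    decide (octopus < ((grid.getD row.toNat []).length : Int))

-- grid[row][octopus] += 1  (in-place mutation, threaded as a new grid)
def pvBump (grid : List (List Int)) (row octopus : Int) : List (List Int) :=
  grid.modify row.toNat (fun r => r.modify octopus.toNat (· + 1))

-- read grid[row][octopus] (bounds already checked by callers)
def pvVal (grid : List (List Int)) (row octopus : Int) : Int :=
  (grid.getD row.toNat []).getD octopus.toNat 0

def flashAtLoc (grid : List (List Int)) (row octopus : Int) (flashLocs : List (Int × Int)) :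
    List (List Int) × List (Int × Int) :=
  if isValid grid row octopus then
    let g := pvBump grid row octopus
    if pvVal g row octopus = 10 then (g, flashLocs ++ [(row, octopus)]) else (g, flashLocs)
  else (grid, flashLocs)

def flashNeighbors (grid : List (List Int)) (row octopus : Int) :
    List (List Int) × List (Int × Int) :=
  let s := flashAtLoc grid row (octopus + 1) []
  let s := flashAtLoc s.1 row (octopus - 1) s.2
  let s := flashAtLoc s.1 (row + 1) octopus s.2
  let s := flashAtLoc s.1 (row - 1) octopus s.2
  let s := flashAtLoc s.1 (row + 1) (octopus + 1) s.2
  let s := flashAtLoc s.1 (row + 1) (octopus - 1) s.2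
  let s := flashAtLoc s.1 (row - 1) (octopus + 1) s.2
  flashAtLoc s.1 (row - 1) (octopus - 1) s.2

-- the inner `for loc in flashLocs: newLocs = newLocs + flashNeighbors(...)`
def processWave (grid : List (List Int)) (locs : List (Int × Int)) :
    List (List Int) × List (Int × Int) :=
  locs.foldl (fun s l =>
    let r := flashNeighbors s.1 l.1 l.2
    (r.1, s.2 ++ r.2)) (grid, [])

-- measure lemmas (cited by the termination proofs of the loops below)
theorem pvGetD_modify {α : Type} (d : α) (l : List α) (i : Nat) (f : α → α) (h : i < l.length) :
    (l.modify i f).getD i d = f (l.getD i d) := by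
  simp [List.getD_eq_getElem?_getD, h]

theorem pvModify_zero {α : Type} (a : α) (l : List α) (f : α → α) :
    (a :: l).modify 0 f = f a :: l := by simp [List.modify]

theorem pvModify_succ {α : Type} (a : α) (l : List α) (n : Nat) (f : α → α) :
    (a :: l).modify (n + 1) f = a :: l.modify n f := by simp [List.modify]

theorem pvRowCnt_modify (row : List Int) (c : Nat) (h : c < row.length) :
    pvRowCnt (row.modify c (· + 1)) + (if row.getD c 0 = 9 then 1 else 0) = pvRowCnt row := by
  induction row generalizing c with
  | nil => simp at h
  | cons a t ih =>
    cases c with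
    | zero =>
      rw [pvModify_zero]
      simp only [pvRowCnt, List.filter_cons, List.getD_cons_zero, decide_eq_true_eq]
      split_ifs <;> (try simp only [List.length_cons]) <;> omega
    | succ n =>
      have h' : n < t.length := by simpa using h
      have hih := ih n h'
      rw [pvModify_succ]
      simp only [pvRowCnt, List.filter_cons, List.getD_cons_succ, decide_eq_true_eq] at hih ⊢
      split_ifs at hih ⊢ <;> (try simp only [List.length_cons] at hih ⊢) <;> omega

theorem pvLcnt_bump (g : List (List Int)) (r c : Nat) (hr : r < g.length)
    (hc : c < (g.getD r []).length) :
    pvLcnt (g.modify r (fun row => row.modify c (· + 1))) +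
      (if (g.getD r []).getD c 0 = 9 then 1 else 0) = pvLcnt g := by
  induction g generalizing r with
  | nil => simp at hr
  | cons row t ih =>
    cases r with
    | zero =>
      simp only [List.getD_cons_zero] at hc ⊢
      have hrow := pvRowCnt_modify row c hc
      rw [pvModify_zero]
      simp only [pvLcnt, List.map_cons, List.sum_cons]
      omega
    | succ n =>
      have hr' : n < t.length := by simpa using hr
      simp only [List.getD_cons_succ] at hc ⊢
      have hih := ih n hr' hc
      rw [pvModify_succ]
      simp only [pvLcnt, List.map_cons, List.sum_cons] at hih ⊢
      omega

theorem flashAtLoc_measure (grid : List (List Int)) (row octopus : Int)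
    (acc : List (Int × Int)) :
    pvLcnt (flashAtLoc grid row octopus acc).1 + (flashAtLoc grid row octopus acc).2.length =
      pvLcnt grid + acc.length := by
  unfold flashAtLoc
  dsimp only
  by_cases hv : isValid grid row octopus = true
  · rw [if_pos hv]
    simp only [isValid, Bool.and_eq_true, decide_eq_true_eq] at hv
    obtain ⟨⟨⟨h0, h1⟩, h2⟩, h3⟩ := hv
    have hr : row.toNat < grid.length := by omega
    have hc : octopus.toNat < (grid.getD row.toNat []).length := by omega
    have hval : pvVal (pvBump grid row octopus) row octopus =
        (grid.getD row.toNat []).getD octopus.toNat 0 + 1 := by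
      unfold pvVal pvBump
      rw [pvGetD_modify [] grid row.toNat _ hr, pvGetD_modify 0 _ octopus.toNat _ hc]
    have hm := pvLcnt_bump grid row.toNat octopus.toNat hr hc
    rw [hval]
    by_cases h9 : (grid.getD row.toNat []).getD octopus.toNat 0 = 9
    · rw [if_pos (show (grid.getD row.toNat []).getD octopus.toNat 0 + 1 = 10 by omega)]
      rw [if_pos h9] at hm
      simp only [List.length_append, List.length_cons, List.length_nil]
      unfold pvBump
      omega
    · rw [if_neg (show ¬ ((grid.getD row.toNat []).getD octopus.toNat 0 + 1 = 10) by omega)]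
      rw [if_neg h9] at hm
      unfold pvBump
      dsimp only
      omega
  · rw [if_neg hv]

theorem flashNeighbors_measure (grid : List (List Int)) (row octopus : Int) :
    pvLcnt (flashNeighbors grid row octopus).1 + (flashNeighbors grid row octopus).2.length =
      pvLcnt grid := by
  unfold flashNeighbors
  simp only [flashAtLoc_measure]
  rfl

theorem processWave_measure_from (locs : List (Int × Int)) (grid : List (List Int))
    (acc : List (Int × Int)) :
    pvLcnt (locs.foldl (fun s l =>
        let r := flashNeighbors s.1 l.1 l.2
        (r.1, s.2 ++ r.2)) (grid, acc)).1 +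
      (locs.foldl (fun s l =>
        let r := flashNeighbors s.1 l.1 l.2
        (r.1, s.2 ++ r.2)) (grid, acc)).2.length = pvLcnt grid + acc.length := by
  induction locs generalizing grid acc with
  | nil => simp
  | cons l t ih =>
    simp only [List.foldl_cons]
    rw [ih]
    have := flashNeighbors_measure grid l.1 l.2
    simp only [List.length_append]
    omega

theorem processWave_measure (grid : List (List Int)) (locs : List (Int × Int)) :
    pvLcnt (processWave grid locs).1 + (processWave grid locs).2.length = pvLcnt grid := by
  have := processWave_measure_from locs grid []
  simpa [processWave] using this

-- the outer `while len(flashLocs) > 0` loop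
def loopA (grid : List (List Int)) (locs : List (Int × Int)) (count : Int) : Int :=
  match locs with
  | [] => count
  | l :: rest =>
    let w := processWave grid (l :: rest)
    loopA w.1 w.2 (count + (w.2.length : Int))
termination_by pvLcnt grid + locs.length
decreasing_by
  have := processWave_measure grid (l :: rest)
  simp only [List.length_cons] at *
  omega

def chainFlash (grid : List (List Int)) (flashLocs : List (Int × Int)) (flashCount : Int) : Int :=
  loopA grid flashLocs (flashCount + (flashLocs.length : Int))

-- ===== PORT B =====
def pvDeltas : List (Int × Int) :=
  [(0, 1), (0, -1), (1, 0), (-1, 0), (1, 1), (1, -1), (-1, 1), (-1, -1)]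

-- body of the inner `for dr, dc in …` loop: state is (grid, queue, flashCount)
def stepB (r c : Int) (s : List (List Int) × List (Int × Int) × Int) (d : Int × Int) :
    List (List Int) × List (Int × Int) × Int :=
  let rr := r + d.1
  let cc := c + d.2
  if 0 ≤ rr ∧ rr < (s.1.length : Int) ∧ 0 ≤ cc ∧ cc < ((s.1.getD rr.toNat []).length : Int) then
    let g := s.1.modify rr.toNat (fun row => row.modify cc.toNat (· + 1))
    if (g.getD rr.toNat []).getD cc.toNat 0 = 10 then (g, s.2.1 ++ [(rr, cc)], s.2.2 + 1)
    else (g, s.2.1, s.2.2)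
  else s

theorem stepB_measure (r c : Int) (s : List (List Int) × List (Int × Int) × Int) (d : Int × Int) :
    pvLcnt (stepB r c s d).1 + (stepB r c s d).2.1.length = pvLcnt s.1 + s.2.1.length := by
  unfold stepB
  dsimp only
  by_cases hv : 0 ≤ r + d.1 ∧ r + d.1 < (s.1.length : Int) ∧ 0 ≤ c + d.2 ∧
      c + d.2 < ((s.1.getD (r + d.1).toNat []).length : Int)
  · rw [if_pos hv]
    obtain ⟨h0, h1, h2, h3⟩ := hv
    have hr : (r + d.1).toNat < s.1.length := by omega
    have hc : (c + d.2).toNat < (s.1.getD (r + d.1).toNat []).length := by omega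
    have hm := pvLcnt_bump s.1 (r + d.1).toNat (c + d.2).toNat hr hc
    have hval : ((s.1.modify (r + d.1).toNat fun row => row.modify (c + d.2).toNat (· + 1)).getD
        (r + d.1).toNat []).getD (c + d.2).toNat 0 =
        (s.1.getD (r + d.1).toNat []).getD (c + d.2).toNat 0 + 1 := by
      rw [pvGetD_modify [] s.1 _ _ hr, pvGetD_modify 0 _ _ _ hc]
    rw [hval]
    by_cases h9 : (s.1.getD (r + d.1).toNat []).getD (c + d.2).toNat 0 = 9
    · rw [if_pos (show (s.1.getD (r + d.1).toNat []).getD (c + d.2).toNat 0 + 1 = 10 by omega)]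
      rw [if_pos h9] at hm
      simp only [List.length_append, List.length_cons, List.length_nil]
      omega
    · rw [if_neg (show ¬ ((s.1.getD (r + d.1).toNat []).getD (c + d.2).toNat 0 + 1 = 10) by
        omega)]
      rw [if_neg h9] at hm
      dsimp only
      omega
  · rw [if_neg hv]

theorem foldl_stepB_measure (ds : List (Int × Int)) (r c : Int)
    (s : List (List Int) × List (Int × Int) × Int) :
    pvLcnt (ds.foldl (stepB r c) s).1 + (ds.foldl (stepB r c) s).2.1.length =
      pvLcnt s.1 + s.2.1.length := by
  induction ds generalizing s with
  | nil => rfl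
  | cons d t ih => rw [List.foldl_cons, ih, stepB_measure]

-- the outer `while queue:` loop (queue.pop(0) = structural head)
def loopB (grid : List (List Int)) (queue : List (Int × Int)) (count : Int) : Int :=
  match queue with
  | [] => count
  | (r, c) :: rest =>
    let s := pvDeltas.foldl (stepB r c) (grid, rest, count)
    loopB s.1 s.2.1 s.2.2
termination_by pvLcnt grid + queue.length
decreasing_by
  have := foldl_stepB_measure pvDeltas r c (grid, rest, count)
  simp only [List.length_cons] at *
  omega

def chainFlash_alt (grid : List (List Int)) (flashLocs : List (Int × Int)) (flashCount : Int) :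
    Int :=
  loopB grid flashLocs (flashCount + (flashLocs.length : Int))

-- ===== PRECONDITION & SPEC =====
def Spec_chainFlash (grid : List (List Int)) (flashLocs : List (Int × Int)) (flashCount : Int) (out : Int) : Prop := out = chainFlash_alt grid flashLocs flashCount
instance (grid : List (List Int)) (flashLocs : List (Int × Int)) (flashCount : Int) (out : Int) : Decidable (Spec_chainFlash grid flashLocs flashCount out) := by unfold Spec_chainFlash; infer_instance

-- ===== CLAIM (what is proved, stated in full; the proofs are below) =====
def Claim_equal_chainFlash : Prop := ∀ (grid : List (List Int)) (flashLocs : List (Int × Int)) (flashCount : Int), Dom_chainFlash grid flashLocs flashCount → Spec_chainFlash grid flashLocs flashCount (chainFlash grid flashLocs flashCount)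

-- ===== LEMMAS AND PROOFS =====

-- flashAtLoc only ever appends to its accumulator
theorem flashAtLoc_acc (grid : List (List Int)) (row octopus : Int) (acc : List (Int × Int)) :
    flashAtLoc grid row octopus acc =
      ((flashAtLoc grid row octopus []).1, acc ++ (flashAtLoc grid row octopus []).2) := by
  unfold flashAtLoc
  dsimp only
  split_ifs <;> simp

-- one stepB = one flashAtLoc, with the queue/count bookkeeping made explicit
theorem stepB_eq_flashAtLoc (r c : Int) (g : List (List Int)) (q : List (Int × Int))
    (cnt : Int) (d : Int × Int) :
    stepB r c (g, q, cnt) d =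
      ((flashAtLoc g (r + d.1) (c + d.2) []).1,
        q ++ (flashAtLoc g (r + d.1) (c + d.2) []).2,
        cnt + ((flashAtLoc g (r + d.1) (c + d.2) []).2.length : Int)) := by
  unfold stepB flashAtLoc pvBump pvVal
  dsimp only
  by_cases hv : 0 ≤ r + d.1 ∧ r + d.1 < (g.length : Int) ∧ 0 ≤ c + d.2 ∧
      c + d.2 < ((g.getD (r + d.1).toNat []).length : Int)
  · have hb : isValid g (r + d.1) (c + d.2) = true := by
      simp only [isValid, Bool.and_eq_true, decide_eq_true_eq]
      tauto
    rw [if_pos hv, if_pos hb]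
    split_ifs <;> simp
  · have hb : ¬ isValid g (r + d.1) (c + d.2) = true := by
      simp only [isValid, Bool.and_eq_true, decide_eq_true_eq]
      tauto
    rw [if_neg hv, if_neg hb]
    simp

-- sequential chain of flashAtLoc over a list of deltas (proof helper mirroring flashNeighbors)
def flashList (g : List (List Int)) (r c : Int) : List (Int × Int) →
    List (List Int) × List (Int × Int)
  | [] => (g, [])
  | d :: ds =>
    let f := flashAtLoc g (r + d.1) (c + d.2) []
    let rest := flashList f.1 r c ds
    (rest.1, f.2 ++ rest.2)

theorem foldl_stepB_eq (ds : List (Int × Int)) (r c : Int) (g : List (List Int))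
    (q : List (Int × Int)) (cnt : Int) :
    ds.foldl (stepB r c) (g, q, cnt) =
      ((flashList g r c ds).1, q ++ (flashList g r c ds).2,
        cnt + ((flashList g r c ds).2.length : Int)) := by
  induction ds generalizing g q cnt with
  | nil => simp [flashList]
  | cons d t ih =>
    rw [List.foldl_cons, stepB_eq_flashAtLoc, ih]
    simp [flashList, List.append_assoc]
    ring

theorem flashNeighbors_eq_flashList (g : List (List Int)) (r c : Int) :
    flashNeighbors g r c = flashList g r c pvDeltas := by
  unfold flashNeighbors pvDeltas
  simp only [flashList]
  simp only [add_zero]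
  rw [flashAtLoc_acc _ r (c - 1), flashAtLoc_acc _ (r + 1) c, flashAtLoc_acc _ (r - 1) c,
    flashAtLoc_acc _ (r + 1) (c + 1), flashAtLoc_acc _ (r + 1) (c - 1),
    flashAtLoc_acc _ (r - 1) (c + 1), flashAtLoc_acc _ (r - 1) (c - 1)]
  simp only [show ∀ x : Int, x + -1 = x - 1 from fun x => by ring]
  simp [List.append_assoc]

-- loopB consumes one wave exactly like processWave
theorem processWave_from (locs : List (Int × Int)) (grid : List (List Int))
    (acc : List (Int × Int)) :
    locs.foldl (fun s l =>
        let r := flashNeighbors s.1 l.1 l.2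
        (r.1, s.2 ++ r.2)) (grid, acc) =
      ((processWave grid locs).1, acc ++ (processWave grid locs).2) := by
  induction locs generalizing grid acc with
  | nil => simp [processWave]
  | cons l t ih =>
    simp only [processWave, List.foldl_cons, List.nil_append]
    rw [ih, ih (flashNeighbors grid l.1 l.2).1 (flashNeighbors grid l.1 l.2).2]
    simp [List.append_assoc]

theorem loopB_cons (g : List (List Int)) (r c : Int) (rest : List (Int × Int)) (cnt : Int) :
    loopB g ((r, c) :: rest) cnt =
      loopB (flashNeighbors g r c).1 (rest ++ (flashNeighbors g r c).2)
        (cnt + ((flashNeighbors g r c).2.length : Int)) := by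
  rw [loopB, foldl_stepB_eq, flashNeighbors_eq_flashList]

theorem loopB_chunk (locs : List (Int × Int)) (g : List (List Int))
    (pending : List (Int × Int)) (cnt : Int) :
    loopB g (locs ++ pending) cnt =
      loopB (processWave g locs).1 (pending ++ (processWave g locs).2)
        (cnt + ((processWave g locs).2.length : Int)) := by
  induction locs generalizing g pending cnt with
  | nil => simp [processWave]
  | cons l t ih =>
    obtain ⟨r, c⟩ := l
    rw [List.cons_append, loopB_cons, List.append_assoc, ih]
    have hw : processWave g ((r, c) :: t) =
        ((processWave (flashNeighbors g r c).1 t).1,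
          (flashNeighbors g r c).2 ++ (processWave (flashNeighbors g r c).1 t).2) := by
      simp only [processWave, List.foldl_cons, List.nil_append]
      rw [processWave_from]
      rfl
    rw [hw]
    simp [List.append_assoc]
    ring_nf

theorem loops_eq (n : Nat) : ∀ (g : List (List Int)) (locs : List (Int × Int)) (cnt : Int),
    pvLcnt g + locs.length ≤ n → loopA g locs cnt = loopB g locs cnt := by
  induction n with
  | zero =>
    intro g locs cnt h
    cases locs with
    | nil => simp [loopA, loopB]
    | cons l t => simp at h
  | succ m ih =>
    intro g locs cnt h
    cases locs with
    | nil => simp [loopA, loopB]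
    | cons l t =>
      rw [loopA]
      have hm := processWave_measure g (l :: t)
      have h1 : pvLcnt (processWave g (l :: t)).1 + (processWave g (l :: t)).2.length ≤ m := by
        simp only [List.length_cons] at h
        omega
      rw [ih _ _ _ h1]
      have := loopB_chunk (l :: t) g [] cnt
      simpa using this.symm

-- ===== VERDICT (by name: the statement is the Claim_ definition above) =====
theorem chainFlash_spec : Claim_equal_chainFlash := by
  intro grid flashLocs flashCount _
  unfold Spec_chainFlash chainFlash chainFlash_alt
  exact loops_eq (pvLcnt grid + flashLocs.length) grid flashLocs _ le_rfl
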